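-- pv_equiv track=rewrite | github.com/asandu-cloud/sports-rag | Scripts/update_football_data_uk.py | canonical_order
-- ===== SOURCE A (Python) =====
-- from typing import Dict, List
--
-- def canonical_order(target_cols: List[str]) -> List[str]:
--     """
--     Put core match columns first, then odds/totals/ah*, then closing*.
--     """
--     core = [
--         "DIV", "Date", "Time", "HOME", "AWAY",
--         "FT_HOME_GOALS", "FT_AWAY_GOALS", "FT_RESULT",
--         "HT_GOME_GOALS", "HT_AWAY_GOALS", "HT_RESULT",
--         "REF",
--         "HOME_SHOTS", "AWAY_SHOTS", "HOME_SOT", "AWAY_SOT",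
--         "HOME_FOUL", "AWAY_FOUL", "HOME_CORNER", "AWAY_CORNER",
--         "HOME_YELLOW", "AWAY_YELLOW", "HOME_RED", "AWAY_RED",
--     ]
--     rest = [c for c in target_cols if c not in core]
--     # sort rest by family to keep stable layout
--     rest_sorted = sorted(rest, key=lambda x: (
--         0 if x.startswith("ODDS_") else
--         1 if x.startswith("TOTALS_") else
--         2 if x.startswith("AH_") else
--         3 if x.startswith("CLOSING_") else
--         9, x
--     ))
--     return core + rest_sorted + ["league", "season"]
-- ===== SOURCE B (Python) =====
-- from typing import List
--
-- def canonical_order(target_cols: List[str]) -> List[str]: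
--     """
--     Put core match columns first, then odds/totals/ah*, then closing*.
--     One pass buckets the non-core columns by family; each bucket is sorted
--     on its own, which reproduces the (family, name) sort order.
--     """
--     core = [
--         "DIV", "Date", "Time", "HOME", "AWAY",
--         "FT_HOME_GOALS", "FT_AWAY_GOALS", "FT_RESULT",
--         "HT_GOME_GOALS", "HT_AWAY_GOALS", "HT_RESULT",
--         "REF",
--         "HOME_SHOTS", "AWAY_SHOTS", "HOME_SOT", "AWAY_SOT",
--         "HOME_FOUL", "AWAY_FOUL", "HOME_CORNER", "AWAY_CORNER",
--         "HOME_YELLOW", "AWAY_YELLOW", "HOME_RED", "AWAY_RED",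
--     ]
--     rest = [c for c in target_cols if c not in core]
--     odds, totals, ah, closing, other = [], [], [], [], []
--     for c in rest:
--         if c.startswith("ODDS_"):
--             odds.append(c)
--         elif c.startswith("TOTALS_"):
--             totals.append(c)
--         elif c.startswith("AH_"):
--             ah.append(c)
--         elif c.startswith("CLOSING_"):
--             closing.append(c)
--         else:
--             other.append(c)
--     return (core + sorted(odds) + sorted(totals) + sorted(ah)
--             + sorted(closing) + sorted(other) + ["league", "season"])
-- ===== Notes on version B (the rewrite author's own statement) =====
-- stated objective: alternative
-- what changed: Replaces the single sort under a composite (family, name) tuple key with a one-pass partition of the non-core columns into five family buckets followed by a plain sort of each bucket, concatenated in family order.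
import Mathlib
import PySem

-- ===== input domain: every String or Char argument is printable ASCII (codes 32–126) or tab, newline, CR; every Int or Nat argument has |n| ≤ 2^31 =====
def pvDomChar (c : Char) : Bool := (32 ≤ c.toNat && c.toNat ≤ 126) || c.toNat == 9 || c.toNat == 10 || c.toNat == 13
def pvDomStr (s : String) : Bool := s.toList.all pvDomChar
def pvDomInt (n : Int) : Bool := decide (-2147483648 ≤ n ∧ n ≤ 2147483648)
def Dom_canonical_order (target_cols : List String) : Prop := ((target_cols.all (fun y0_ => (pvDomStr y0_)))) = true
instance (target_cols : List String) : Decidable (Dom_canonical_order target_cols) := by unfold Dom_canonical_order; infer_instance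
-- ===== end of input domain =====

-- B replaces the single sort under a composite (family, name) key by a one-pass
-- partition into five family buckets, each sorted on its own and concatenated
-- (objective: alternative decomposition, same cost).

-- ===== PORT A =====
-- the fixed `core` list, a literal in both Pythons
def pvCore : List String :=
  ["DIV", "Date", "Time", "HOME", "AWAY",
   "FT_HOME_GOALS", "FT_AWAY_GOALS", "FT_RESULT",
   "HT_GOME_GOALS", "HT_AWAY_GOALS", "HT_RESULT",
   "REF",
   "HOME_SHOTS", "AWAY_SHOTS", "HOME_SOT", "AWAY_SOT",
   "HOME_FOUL", "AWAY_FOUL", "HOME_CORNER", "AWAY_CORNER",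
   "HOME_YELLOW", "AWAY_YELLOW", "HOME_RED", "AWAY_RED"]

-- first component of A's tuple key (the if-chain in the lambda)
def pvFam (x : String) : Int :=
  if PySem.Str.startswith x "ODDS_" then 0
  else if PySem.Str.startswith x "TOTALS_" then 1
  else if PySem.Str.startswith x "AH_" then 2
  else if PySem.Str.startswith x "CLOSING_" then 3
  else 9

def canonical_order (target_cols : List String) : List String :=
  let rest := target_cols.filter (fun c => !(pvCore.contains c))
  let rest_sorted := PySem.List.sorted2 rest (fun x => pvFam x) (fun x => x)
  pvCore ++ rest_sorted ++ ["league", "season"]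

-- ===== PORT B =====
-- one loop iteration of B: append c to the bucket of its family (elif chain)
def pvStep (b : List String × List String × List String × List String × List String)
    (c : String) : List String × List String × List String × List String × List String :=
  if PySem.Str.startswith c "ODDS_" then (b.1 ++ [c], b.2.1, b.2.2.1, b.2.2.2.1, b.2.2.2.2)
  else if PySem.Str.startswith c "TOTALS_" then (b.1, b.2.1 ++ [c], b.2.2.1, b.2.2.2.1, b.2.2.2.2)
  else if PySem.Str.startswith c "AH_" then (b.1, b.2.1, b.2.2.1 ++ [c], b.2.2.2.1, b.2.2.2.2)
  else if PySem.Str.startswith c "CLOSING_" then (b.1, b.2.1, b.2.2.1, b.2.2.2.1 ++ [c], b.2.2.2.2)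
  else (b.1, b.2.1, b.2.2.1, b.2.2.2.1, b.2.2.2.2 ++ [c])

def canonical_order_alt (target_cols : List String) : List String :=
  let rest := target_cols.filter (fun c => !(pvCore.contains c))
  let b := rest.foldl pvStep ([], [], [], [], [])
  pvCore ++ PySem.List.sorted b.1 (fun x => x) ++ PySem.List.sorted b.2.1 (fun x => x)
    ++ PySem.List.sorted b.2.2.1 (fun x => x) ++ PySem.List.sorted b.2.2.2.1 (fun x => x)
    ++ PySem.List.sorted b.2.2.2.2 (fun x => x) ++ ["league", "season"]

-- ===== PRECONDITION & SPEC =====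
def Spec_canonical_order (target_cols : List String) (out : List String) : Prop := out = canonical_order_alt target_cols
instance (target_cols : List String) (out : List String) : Decidable (Spec_canonical_order target_cols out) := by unfold Spec_canonical_order; infer_instance

-- ===== CLAIM (what is proved, stated in full; the proofs are below) =====
def Claim_equal_canonical_order : Prop := ∀ (target_cols : List String), Dom_canonical_order target_cols → Spec_canonical_order target_cols (canonical_order target_cols)

-- ===== LEMMAS AND PROOFS =====

-- the comparison sorted2 uses for A's tuple key
def pvLt (a b : String) : Bool :=
  decide (pvFam a < pvFam b) || (!decide (pvFam b < pvFam a) && decide (a < b))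

-- the i-th family bucket of a list
def pvBucket (i : Int) (xs : List String) : List String :=
  xs.filter (fun c => pvFam c == i)

-- insertion sort by plain string order (= PySem.List.sorted _ id, by sorted_eq_foldl_insertBy)
def pvG (i : Int) (xs : List String) : List String :=
  List.foldl (fun acc x => PySem.List.insertBy (fun a b => decide (a < b)) x acc) [] (pvBucket i xs)

lemma pvFam_cases (x : String) :
    pvFam x = 0 ∨ pvFam x = 1 ∨ pvFam x = 2 ∨ pvFam x = 3 ∨ pvFam x = 9 := by
  unfold pvFam; split_ifs <;> simp

lemma insertBy_skip (before : String → String → Bool) (x : String) (ys zs : List String)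
    (h : ∀ y ∈ ys, before x y = false) :
    PySem.List.insertBy before x (ys ++ zs) = ys ++ PySem.List.insertBy before x zs := by
  induction ys with
  | nil => simp
  | cons y ys ih =>
    simp only [List.cons_append, PySem.List.insertBy, h y (by simp)]
    simp only [Bool.false_eq_true, if_false]
    rw [ih (fun y hy => h y (by simp [hy]))]

lemma insertBy_take (before : String → String → Bool) (x : String) (ys zs : List String)
    (h : ∀ z ∈ zs, before x z = true) :
    PySem.List.insertBy before x (ys ++ zs) = PySem.List.insertBy before x ys ++ zs := by
  induction ys with
  | nil =>
    cases zs with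
    | nil => simp [PySem.List.insertBy]
    | cons z t => simp [PySem.List.insertBy, h z (by simp)]
  | cons y ys ih =>
    by_cases hxy : before x y = true
    · simp [PySem.List.insertBy, hxy]
    · simp only [Bool.not_eq_true] at hxy
      simp only [List.cons_append, PySem.List.insertBy, hxy, Bool.false_eq_true, if_false]
      rw [ih]

lemma insertBy_congr (before before' : String → String → Bool) (x : String) (ys : List String)
    (h : ∀ y ∈ ys, before x y = before' x y) :
    PySem.List.insertBy before x ys = PySem.List.insertBy before' x ys := by
  induction ys with
  | nil => simp [PySem.List.insertBy]
  | cons y ys ih =>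
    simp only [PySem.List.insertBy, h y (by simp)]
    rw [ih (fun y hy => h y (by simp [hy]))]

lemma pvLt_of_lt {x y : String} (h : pvFam x < pvFam y) : pvLt x y = true := by
  simp [pvLt, h]

lemma pvLt_of_gt {x y : String} (h : pvFam y < pvFam x) : pvLt x y = false := by
  simp [pvLt, h, not_lt_of_gt h]

lemma pvLt_of_eq {x y : String} (h : pvFam y = pvFam x) : pvLt x y = decide (x < y) := by
  simp [pvLt, h]

lemma mem_pvG {i : Int} {xs : List String} {y : String} (h : y ∈ pvG i xs) : pvFam y = i := by
  unfold pvG at h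
  have := (PySem.List.foldl_insertBy_perm (fun a b => decide (a < b)) (pvBucket i xs) []).mem_iff.mp h
  simp only [List.nil_append, pvBucket, List.mem_filter, beq_iff_eq] at this
  exact this.2

-- inserting x into the concatenation of blocks: skip strictly smaller families,
-- insert by string order within x's own family, stop before larger families
lemma insert_middle (x : String) (P M Q : List String)
    (hP : ∀ y ∈ P, pvFam y < pvFam x) (hM : ∀ y ∈ M, pvFam y = pvFam x)
    (hQ : ∀ z ∈ Q, pvFam x < pvFam z) :
    PySem.List.insertBy pvLt x (P ++ M ++ Q)
      = P ++ PySem.List.insertBy (fun a b => decide (a < b)) x M ++ Q := by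
  rw [List.append_assoc, insertBy_skip pvLt x P (M ++ Q) (fun y hy => pvLt_of_gt (hP y hy)),
    insertBy_take pvLt x M Q (fun z hz => pvLt_of_lt (hQ z hz)),
    insertBy_congr pvLt (fun a b => decide (a < b)) x M (fun y hy => pvLt_of_eq (hM y hy)),
    List.append_assoc]

lemma pvBucket_append_single (i : Int) (xs : List String) (x : String) :
    pvBucket i (xs ++ [x]) = pvBucket i xs ++ (if pvFam x = i then [x] else []) := by
  unfold pvBucket
  rw [List.filter_append]
  by_cases h : pvFam x = i <;> simp [h]

lemma pvG_append_single (i : Int) (xs : List String) (x : String) :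
    pvG i (xs ++ [x]) = if pvFam x = i
      then PySem.List.insertBy (fun a b => decide (a < b)) x (pvG i xs)
      else pvG i xs := by
  unfold pvG
  rw [pvBucket_append_single]
  by_cases h : pvFam x = i <;> simp [h, List.foldl_append]

-- the heart of the equivalence: A's insertion sort under the composite key builds
-- exactly the concatenation of the per-family insertion sorts
lemma foldl_insert_eq_blocks (xs : List String) :
    List.foldl (fun acc x => PySem.List.insertBy pvLt x acc) [] xs
      = pvG 0 xs ++ pvG 1 xs ++ pvG 2 xs ++ pvG 3 xs ++ pvG 9 xs := by
  induction xs using List.reverseRecOn with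
  | nil => simp [pvG, pvBucket]
  | append_singleton xs x ih =>
    rw [List.foldl_append, List.foldl_cons, List.foldl_nil, ih]
    simp only [pvG_append_single]
    have g0 : ∀ y ∈ pvG 0 xs, pvFam y = 0 := fun y hy => mem_pvG hy
    have g1 : ∀ y ∈ pvG 1 xs, pvFam y = 1 := fun y hy => mem_pvG hy
    have g2 : ∀ y ∈ pvG 2 xs, pvFam y = 2 := fun y hy => mem_pvG hy
    have g3 : ∀ y ∈ pvG 3 xs, pvFam y = 3 := fun y hy => mem_pvG hy
    have g9 : ∀ y ∈ pvG 9 xs, pvFam y = 9 := fun y hy => mem_pvG hy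
    rcases pvFam_cases x with h | h | h | h | h <;> rw [h] <;> simp only [reduceIte]
    · have e := insert_middle x [] (pvG 0 xs) (pvG 1 xs ++ pvG 2 xs ++ pvG 3 xs ++ pvG 9 xs)
        (by simp)
        (fun y hy => by rw [g0 y hy, h])
        (by
          intro z hz; rw [h]
          simp only [List.mem_append] at hz
          rcases hz with ((hz | hz) | hz) | hz
          · rw [g1 z hz]; norm_num
          · rw [g2 z hz]; norm_num
          · rw [g3 z hz]; norm_num
          · rw [g9 z hz]; norm_num)
      simp only [List.nil_append, List.append_assoc] at e ⊢
      exact e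
    · have e := insert_middle x (pvG 0 xs) (pvG 1 xs) (pvG 2 xs ++ pvG 3 xs ++ pvG 9 xs)
        (fun y hy => by rw [g0 y hy, h]; norm_num)
        (fun y hy => by rw [g1 y hy, h])
        (by
          intro z hz; rw [h]
          simp only [List.mem_append] at hz
          rcases hz with (hz | hz) | hz
          · rw [g2 z hz]; norm_num
          · rw [g3 z hz]; norm_num
          · rw [g9 z hz]; norm_num)
      simp only [List.append_assoc] at e ⊢
      exact e
    · have e := insert_middle x (pvG 0 xs ++ pvG 1 xs) (pvG 2 xs) (pvG 3 xs ++ pvG 9 xs)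
        (by
          intro y hy
          simp only [List.mem_append] at hy
          rcases hy with hy | hy
          · rw [g0 y hy, h]; norm_num
          · rw [g1 y hy, h]; norm_num)
        (fun y hy => by rw [g2 y hy, h])
        (by
          intro z hz; rw [h]
          simp only [List.mem_append] at hz
          rcases hz with hz | hz
          · rw [g3 z hz]; norm_num
          · rw [g9 z hz]; norm_num)
      simp only [List.append_assoc] at e ⊢
      exact e
    · have e := insert_middle x (pvG 0 xs ++ pvG 1 xs ++ pvG 2 xs) (pvG 3 xs) (pvG 9 xs)
        (by
          intro y hy
          simp only [List.mem_append] at hy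
          rcases hy with (hy | hy) | hy
          · rw [g0 y hy, h]; norm_num
          · rw [g1 y hy, h]; norm_num
          · rw [g2 y hy, h]; norm_num)
        (fun y hy => by rw [g3 y hy, h])
        (fun z hz => by rw [h, g9 z hz]; norm_num)
      simp only [List.append_assoc] at e ⊢
      exact e
    · have e := insert_middle x (pvG 0 xs ++ pvG 1 xs ++ pvG 2 xs ++ pvG 3 xs) (pvG 9 xs) []
        (by
          intro y hy
          simp only [List.mem_append] at hy
          rcases hy with ((hy | hy) | hy) | hy
          · rw [g0 y hy, h]; norm_num
          · rw [g1 y hy, h]; norm_num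
          · rw [g2 y hy, h]; norm_num
          · rw [g3 y hy, h]; norm_num)
        (fun y hy => by rw [g9 y hy, h])
        (by simp)
      simp only [List.append_nil, List.append_assoc] at e ⊢
      exact e

-- B's one-pass fold computes exactly the five family buckets
lemma foldl_pvStep_eq (l : List String)
    (b : List String × List String × List String × List String × List String) :
    l.foldl pvStep b
      = (b.1 ++ pvBucket 0 l, b.2.1 ++ pvBucket 1 l, b.2.2.1 ++ pvBucket 2 l,
         b.2.2.2.1 ++ pvBucket 3 l, b.2.2.2.2 ++ pvBucket 9 l) := by
  induction l generalizing b with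
  | nil => simp [pvBucket]
  | cons c l ih =>
    rw [List.foldl_cons, ih]
    have hb : ∀ i : Int, pvBucket i (c :: l)
        = (if pvFam c = i then [c] else []) ++ pvBucket i l := by
      intro i; unfold pvBucket; by_cases h : pvFam c = i <;> simp [h]
    by_cases h1 : PySem.Str.startswith c "ODDS_" = true
    · have hf : pvFam c = 0 := by unfold pvFam; rw [if_pos h1]
      have hs : pvStep b c = (b.1 ++ [c], b.2.1, b.2.2.1, b.2.2.2.1, b.2.2.2.2) := by
        unfold pvStep; rw [if_pos h1]
      rw [hs]; simp [hb, hf]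
    · by_cases h2 : PySem.Str.startswith c "TOTALS_" = true
      · have hf : pvFam c = 1 := by unfold pvFam; rw [if_neg h1, if_pos h2]
        have hs : pvStep b c = (b.1, b.2.1 ++ [c], b.2.2.1, b.2.2.2.1, b.2.2.2.2) := by
          unfold pvStep; rw [if_neg h1, if_pos h2]
        rw [hs]; simp [hb, hf]
      · by_cases h3 : PySem.Str.startswith c "AH_" = true
        · have hf : pvFam c = 2 := by unfold pvFam; rw [if_neg h1, if_neg h2, if_pos h3]
          have hs : pvStep b c = (b.1, b.2.1, b.2.2.1 ++ [c], b.2.2.2.1, b.2.2.2.2) := by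
            unfold pvStep; rw [if_neg h1, if_neg h2, if_pos h3]
          rw [hs]; simp [hb, hf]
        · by_cases h4 : PySem.Str.startswith c "CLOSING_" = true
          · have hf : pvFam c = 3 := by
              unfold pvFam; rw [if_neg h1, if_neg h2, if_neg h3, if_pos h4]
            have hs : pvStep b c = (b.1, b.2.1, b.2.2.1, b.2.2.2.1 ++ [c], b.2.2.2.2) := by
              unfold pvStep; rw [if_neg h1, if_neg h2, if_neg h3, if_pos h4]
            rw [hs]; simp [hb, hf]
          · have hf : pvFam c = 9 := by
              unfold pvFam; rw [if_neg h1, if_neg h2, if_neg h3, if_neg h4]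
            have hs : pvStep b c = (b.1, b.2.1, b.2.2.1, b.2.2.2.1, b.2.2.2.2 ++ [c]) := by
              unfold pvStep; rw [if_neg h1, if_neg h2, if_neg h3, if_neg h4]
            rw [hs]; simp [hb, hf]

lemma sorted2_eq_blocks (xs : List String) :
    PySem.List.sorted2 xs (fun x => pvFam x) (fun x => x)
      = PySem.List.sorted (pvBucket 0 xs) (fun x => x)
        ++ PySem.List.sorted (pvBucket 1 xs) (fun x => x)
        ++ PySem.List.sorted (pvBucket 2 xs) (fun x => x)
        ++ PySem.List.sorted (pvBucket 3 xs) (fun x => x)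
        ++ PySem.List.sorted (pvBucket 9 xs) (fun x => x) := by
  have h9 : ∀ i : Int, PySem.List.sorted (pvBucket i xs) (fun x => x) = pvG i xs := by
    intro i
    rw [PySem.List.sorted_eq_foldl_insertBy]
    rfl
  rw [h9, h9, h9, h9, h9]
  rw [← foldl_insert_eq_blocks]
  rfl

-- ===== VERDICT (by name: the statement is the Claim_ definition above) =====
theorem canonical_order_spec : Claim_equal_canonical_order := by
  intro target_cols _
  unfold Spec_canonical_order canonical_order canonical_order_alt
  simp only [sorted2_eq_blocks, foldl_pvStep_eq]
  simp [List.append_assoc]
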